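-- pv_equiv track=rewrite | github.com/pypi-data/pypi-mirror-299 | packages/gridengine-framework/gridengine_framework-0.91.8.tar.gz/gridengine_framework-0.91.8/grid_engine/_terraform/terraformer.py | _apply_forest_cellular_automata
-- ===== SOURCE A (Python) =====
-- from typing import List, Tuple, Optional, Any, Union, AnyStr
--
-- def _apply_forest_cellular_automata(forest_map: List[List[bool]], iterations: int) -> List[List[bool]]:
--     """Refine forest shapes using cellular automata."""
--     width, height = len(forest_map[0]), len(forest_map)
--
--     for _ in range(iterations):
--         new_map = [[False for _ in range(width)] for _ in range(height)]
--         for y in range(height):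
--             for x in range(width):
--                 count = sum(forest_map[ny][nx]
--                             for ny in range(max(0, y-1), min(height, y+2))
--                             for nx in range(max(0, x-1), min(width, x+2))
--                             if (ny, nx) != (y, x))
--                 if forest_map[y][x]:
--                     new_map[y][x] = count >= 4  # Stay forest if 4 or more neighbors are forest
--                 else:
--                     new_map[y][x] = count >= 5  # Become forest if 5 or more neighbors are forest
--         forest_map = new_map
--
--     return forest_map
-- ===== SOURCE B (Python) =====
-- def _apply_forest_cellular_automata(forest_map, iterations):
--     """Refine forest shapes using cellular automata (summed-area-table version)."""
--     width, height = len(forest_map[0]), len(forest_map)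
--
--     for _ in range(iterations):
--         # Build the 2D prefix-sum table S: S[i][j] = number of True cells in
--         # the rectangle rows < i, columns < j.
--         S = [[0] * (width + 1)]
--         for row in forest_map:
--             prev = S[-1]
--             cur = [0]
--             for x, v in enumerate(row[:width]):
--                 cur.append(v + prev[x + 1] + cur[x] - prev[x])
--             S.append(cur)
--         new_map = []
--         for y in range(height):
--             y0, y1 = max(0, y - 1), min(height, y + 2)
--             new_row = []
--             for x in range(width):
--                 x0, x1 = max(0, x - 1), min(width, x + 2)
--                 cnt = S[y1][x1] - S[y0][x1] - S[y1][x0] + S[y0][x0] - forest_map[y][x]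
--                 new_row.append(cnt >= (4 if forest_map[y][x] else 5))
--             new_map.append(new_row)
--         forest_map = new_map
--
--     return forest_map
-- ===== Notes on version B (the rewrite author's own statement) =====
-- stated objective: faster
-- what changed: Each iteration now builds a 2D summed-area (prefix-sum) table once and reads each neighbourhood count as four table lookups minus the center, instead of re-summing a 3x3 generator expression per cell.
import Mathlib
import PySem

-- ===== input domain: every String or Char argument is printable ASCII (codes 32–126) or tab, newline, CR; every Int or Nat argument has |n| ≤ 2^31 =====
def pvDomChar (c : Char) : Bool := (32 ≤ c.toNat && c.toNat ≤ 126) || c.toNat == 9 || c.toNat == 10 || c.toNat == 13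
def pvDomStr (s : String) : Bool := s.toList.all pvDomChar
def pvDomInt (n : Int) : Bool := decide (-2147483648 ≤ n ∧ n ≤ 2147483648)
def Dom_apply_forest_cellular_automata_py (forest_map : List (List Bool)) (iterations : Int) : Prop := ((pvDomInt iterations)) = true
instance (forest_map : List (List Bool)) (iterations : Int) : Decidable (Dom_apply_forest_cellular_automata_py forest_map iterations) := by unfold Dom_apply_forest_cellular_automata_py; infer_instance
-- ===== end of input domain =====

-- B replaces the per-cell 3x3 double generator by a summed-area (2D prefix-sum) table built
-- once per iteration (objective: faster, constant factor).  All list indices that Python uses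
-- here are nonnegative and in range on Pre_, so plain Nat indexing with getD is exact.

-- ===== PORT A =====
-- forest_map[y][x] (y, x nonnegative, in range on Pre_)
def pvCellGet (m : List (List Bool)) (y x : Nat) : Bool := (m.getD y []).getD x false

-- count = sum(forest_map[ny][nx] for ny in range(max(0,y-1), min(height,y+2))
--                                for nx in range(max(0,x-1), min(width,x+2)) if (ny,nx) != (y,x))
def pvCountA (m : List (List Bool)) (h w y x : Nat) : Int :=
  (List.range' (y - 1) (min h (y + 2) - (y - 1))).foldl (fun acc ny =>
    (List.range' (x - 1) (min w (x + 2) - (x - 1))).foldl (fun acc2 nx =>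
      if (ny, nx) ≠ (y, x) ∧ pvCellGet m ny nx = true then acc2 + 1 else acc2) acc) 0

-- one iteration: new_map, filled cell by cell over range(height) x range(width)
def pvStepA (h w : Nat) (m : List (List Bool)) : List (List Bool) :=
  (List.range h).map (fun y => (List.range w).map (fun x =>
    if pvCellGet m y x then decide ((4 : Int) ≤ pvCountA m h w y x)
    else decide ((5 : Int) ≤ pvCountA m h w y x)))

def apply_forest_cellular_automata_py (forest_map : List (List Bool)) (iterations : Int) : List (List Bool) :=
  let w := (forest_map.headD []).length
  let h := forest_map.length
  (List.range iterations.toNat).foldl (fun m _ => pvStepA h w m) forest_map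

-- ===== PORT B =====
-- inner loop 'for x, v in enumerate(row[:width]): cur.append(v + prev[x+1] + cur[x] - prev[x])'
def pvPrefRow : List Bool → List Int → Int → List Int
  | [], _, _ => []
  | b :: bs, prev, cur =>
    let c := (if b then (1 : Int) else 0) + prev.tail.headD 0 + cur - prev.headD 0
    c :: pvPrefRow bs prev.tail c

-- 'for row in forest_map: prev = S[-1]; ...; S.append(cur)'
def pvBuildS (w : Nat) : List (List Bool) → List Int → List (List Int)
  | [], _ => []
  | row :: rest, prev =>
    let cur := 0 :: pvPrefRow (row.take w) prev 0
    cur :: pvBuildS w rest cur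

-- one iteration via the summed-area table S
def pvStepB (h w : Nat) (m : List (List Bool)) : List (List Bool) :=
  let S := List.replicate (w + 1) (0 : Int) :: pvBuildS w m (List.replicate (w + 1) 0)
  (List.range h).map (fun y =>
    let y0 := y - 1
    let y1 := min h (y + 2)
    (List.range w).map (fun x =>
      let x0 := x - 1
      let x1 := min w (x + 2)
      let g := fun (i j : Nat) => ((S.getD i []).getD j 0 : Int)
      let cnt := g y1 x1 - g y0 x1 - g y1 x0 + g y0 x0 - (if pvCellGet m y x then 1 else 0)
      decide (cnt ≥ (if pvCellGet m y x then (4 : Int) else 5))))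

def apply_forest_cellular_automata_py_alt (forest_map : List (List Bool)) (iterations : Int) : List (List Bool) :=
  let w := (forest_map.headD []).length
  let h := forest_map.length
  (List.range iterations.toNat).foldl (fun m _ => pvStepB h w m) forest_map

-- ===== PRECONDITION & SPEC =====
-- Pre_ excludes exactly the inputs where Python A raises IndexError: the empty map
-- (forest_map[0] fails), and, when at least one iteration runs, a row shorter than the
-- first row (forest_map[ny][nx] fails for some in-range nx).  A never returns a value there.
def Pre_apply_forest_cellular_automata_py (forest_map : List (List Bool)) (iterations : Int) : Prop :=
  forest_map ≠ [] ∧ (iterations ≤ 0 ∨ ∀ row ∈ forest_map, (forest_map.headD []).length ≤ row.length)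
instance (forest_map : List (List Bool)) (iterations : Int) : Decidable (Pre_apply_forest_cellular_automata_py forest_map iterations) := by unfold Pre_apply_forest_cellular_automata_py; infer_instance

def pvWitness_apply_forest_cellular_automata_py : List (List Bool) × Int :=
  ([[true, true, false], [true, true, true], [false, true, false]], 2)

def Spec_apply_forest_cellular_automata_py (forest_map : List (List Bool)) (iterations : Int) (out : List (List Bool)) : Prop := out = apply_forest_cellular_automata_py_alt forest_map iterations
instance (forest_map : List (List Bool)) (iterations : Int) (out : List (List Bool)) : Decidable (Spec_apply_forest_cellular_automata_py forest_map iterations out) := by unfold Spec_apply_forest_cellular_automata_py; infer_instance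

-- ===== CLAIM (what is proved, stated in full; the proofs are below) =====
def Claim_equal_apply_forest_cellular_automata_py : Prop := ∀ (forest_map : List (List Bool)) (iterations : Int), Dom_apply_forest_cellular_automata_py forest_map iterations → Pre_apply_forest_cellular_automata_py forest_map iterations → Spec_apply_forest_cellular_automata_py forest_map iterations (apply_forest_cellular_automata_py forest_map iterations)

-- ===== LEMMAS AND PROOFS =====

-- 0/1 indicator of a cell
def pvInd (b : Bool) : Int := if b then 1 else 0

-- sum of the first j entries of a row
def pvRowSum (r : List Bool) (j : Nat) : Int := ((r.take j).map pvInd).sum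

-- sum of the full j-wide prefixes of the first i rows (the mathematical summed-area table)
def pvP (m : List (List Bool)) (i j : Nat) : Int := ((m.take i).map (fun r => pvRowSum r j)).sum

lemma pvTailGetD (l : List Int) (j : Nat) : l.tail.getD j 0 = l.getD (j + 1) 0 := by
  cases l <;> simp

lemma pvRowSum_take (r : List Bool) (w j : Nat) (hj : j ≤ w) :
    pvRowSum (r.take w) j = pvRowSum r j := by
  simp [pvRowSum, List.take_take, Nat.min_eq_left hj]

lemma pvRowSum_succ (b : Bool) (bs : List Bool) (k : Nat) :
    pvRowSum (b :: bs) (k + 1) = pvInd b + pvRowSum bs k := by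
  simp [pvRowSum]

lemma pvHeadD (l : List Int) : l.headD 0 = l.getD 0 0 := by cases l <;> simp

lemma pvRepGetD (n j : Nat) : (List.replicate n (0:Int)).getD j 0 = 0 := by
  induction n generalizing j with
  | zero => simp
  | succ n ih =>
    cases j with
    | zero => simp [List.replicate_succ]
    | succ j => simp [List.replicate_succ, ih]

lemma pvSumSub {α : Type} (l : List α) (f g : α → Int) :
    (l.map (fun a => f a - g a)).sum = (l.map f).sum - (l.map g).sum := by
  induction l with
  | nil => simp
  | cons a l ih => simp [ih]; ring

lemma pvSingleSum (c : Int) : ∀ (x0 n x : Nat), x0 ≤ x → x < x0 + n →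
    ((List.range' x0 n).map (fun nx => if nx = x then c else 0)).sum = c := by
  intro x0 n
  induction n generalizing x0 with
  | zero => intro x h1 h2; omega
  | succ n ih =>
    intro x h1 h2
    rw [List.range'_succ]
    simp only [List.map_cons, List.sum_cons]
    by_cases hx : x0 = x
    · subst hx
      simp only [if_pos rfl]
      have hz : ((List.range' (x0+1) n).map (fun nx => if nx = x0 then c else 0)).sum = 0 := by
        apply List.sum_eq_zero
        intro z hz
        simp only [List.mem_map] at hz
        obtain ⟨e, he, rfl⟩ := hz
        have := (List.mem_range'_1.mp he).1
        rw [if_neg (by omega)]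
      rw [hz]; simp
    · rw [if_neg hx, ih (x0+1) x (by omega) (by omega)]; ring

lemma pvInner (m : List (List Bool)) (y x ny x0 x1 : Nat) (h0 : x0 ≤ x) (h1 : x < x1) :
    (((List.range' x0 (x1 - x0)).countP
        (fun nx => decide ((ny, nx) ≠ (y, x) ∧ pvCellGet m ny nx = true)) : Nat) : Int)
      = ((List.range' x0 (x1 - x0)).map (fun nx => pvInd (pvCellGet m ny nx))).sum
        - (if ny = y then pvInd (pvCellGet m y x) else 0) := by
  rw [← PySem.List.sum_map_ite_one_zero
    (fun nx => decide ((ny, nx) ≠ (y, x) ∧ pvCellGet m ny nx = true)) (List.range' x0 (x1 - x0))]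
  have hpt : ∀ nx ∈ List.range' x0 (x1 - x0),
      (if (fun nx => decide ((ny, nx) ≠ (y, x) ∧ pvCellGet m ny nx = true)) nx = true then (1:Int) else 0)
        = pvInd (pvCellGet m ny nx) - (if ny = y ∧ nx = x then pvInd (pvCellGet m y x) else 0) := by
    intro nx _
    by_cases hy' : ny = y <;> by_cases hx' : nx = x
    · simp [hy', hx', pvInd]
    · cases hc : pvCellGet m y nx <;> simp [hy', hx', Prod.ext_iff, pvInd, hc]
    · cases hc : pvCellGet m ny x <;> simp [hy', hx', Prod.ext_iff, pvInd, hc]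
    · cases hc : pvCellGet m ny nx <;> simp [hy', hx', Prod.ext_iff, pvInd, hc]
  rw [List.map_congr_left hpt, pvSumSub]
  by_cases hy' : ny = y
  · subst hy'
    simp only [true_and]
    rw [pvSingleSum (pvInd (pvCellGet m ny x)) x0 (x1 - x0) x h0 (by omega)]
    simp
  · have hz : ∀ nx : Nat, (if ny = y ∧ nx = x then pvInd (pvCellGet m y x) else 0) = (0:Int) :=
      fun nx => by simp [hy']
    simp [hz, hy']

lemma pvPrefRow_getD (bs : List Bool) : ∀ (prev : List Int) (cur : Int) (k : Nat),
    k < bs.length →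
    (pvPrefRow bs prev cur).getD k 0
      = cur + prev.getD (k + 1) 0 - prev.getD 0 0 + pvRowSum bs (k + 1) := by
  induction bs with
  | nil => intro prev cur k hk; simp at hk
  | cons b bs ih =>
    intro prev cur k hk
    cases k with
    | zero =>
      simp only [pvPrefRow, List.getD_cons_zero]
      simp only [pvHeadD, pvTailGetD, pvRowSum_succ]
      simp [pvRowSum, pvInd]
      ring
    | succ k =>
      have hk' : k < bs.length := by simpa using hk
      simp only [pvPrefRow, List.getD_cons_succ]
      rw [ih _ _ _ hk']
      simp only [pvHeadD, pvTailGetD, pvRowSum_succ, pvInd]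
      ring

lemma pvBuildS_getD (w : Nat) (rows : List (List Bool)) : ∀ (prev : List Int) (C : Nat → Int),
    C 0 = 0 → (∀ j, j ≤ w → prev.getD j 0 = C j) → (∀ r ∈ rows, w ≤ r.length) →
    ∀ i j, i < rows.length → j ≤ w →
    ((pvBuildS w rows prev).getD i []).getD j 0 = C j + pvP rows (i + 1) j := by
  induction rows with
  | nil => intro prev C hC0 hprev hrows i j hi hj; simp at hi
  | cons r rest ih =>
    intro prev C hC0 hprev hrows i j hi hj
    have hrlen : w ≤ r.length := hrows r (by simp)
    have hcur : ∀ j, j ≤ w → (0 :: pvPrefRow (r.take w) prev 0).getD j 0 = C j + pvRowSum r j := by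
      intro j hj
      cases j with
      | zero => simp [hC0, pvRowSum]
      | succ k =>
        have hk : k < (r.take w).length := by simp [List.length_take]; omega
        rw [List.getD_cons_succ, pvPrefRow_getD _ _ _ _ hk, pvRowSum_take r w (k+1) hj,
            hprev _ hj, hprev 0 (Nat.zero_le _), hC0]
        ring
    cases i with
    | zero =>
      simp only [pvBuildS, List.getD_cons_zero]
      rw [hcur j hj]
      simp [pvP, pvRowSum]
    | succ i =>
      simp only [pvBuildS, List.getD_cons_succ]
      rw [ih (0 :: pvPrefRow (r.take w) prev 0) (fun j => C j + pvRowSum r j)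
        (by simp [hC0, pvRowSum]) hcur (fun r' hr' => hrows r' (by simp [hr'])) i j (by simpa using hi) hj]
      simp [pvP]
      ring

lemma pvSget (w : Nat) (m : List (List Bool)) (hrow : ∀ r ∈ m, w ≤ r.length)
    (i j : Nat) (hi : i ≤ m.length) (hj : j ≤ w) :
    (((List.replicate (w + 1) (0 : Int) :: pvBuildS w m (List.replicate (w + 1) 0)).getD i []).getD j 0)
      = pvP m i j := by
  cases i with
  | zero => simp [pvP, pvRepGetD]
  | succ i =>
    rw [List.getD_cons_succ]
    rw [pvBuildS_getD w m (List.replicate (w+1) 0) (fun _ => 0) rfl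
      (fun j hj => pvRepGetD _ _) hrow i j (by omega) hj]
    simp

-- a sum over a slice l[a:a+b] equals the sum over indices range' a b (generic bridge)
lemma pvSliceSum {α : Type} (l : List α) (d : α) (f : α → Int) :
    ∀ (a b : Nat), a + b ≤ l.length →
    (((l.drop a).take b).map f).sum = ((List.range' a b).map (fun i => f (l.getD i d))).sum := by
  intro a b
  induction b generalizing a with
  | zero => intro _; simp
  | succ b ih =>
    intro hab
    have ha : a < l.length := by omega
    rw [List.drop_eq_getElem_cons ha, List.range'_succ]
    simp only [List.take_succ_cons, List.map_cons, List.sum_cons]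
    rw [ih (a+1) (by omega), List.getD_eq_getElem l d ha]

lemma pvRowSum_window (r : List Bool) (x0 x1 : Nat) (h0 : x0 ≤ x1) (h1 : x1 ≤ r.length) :
    pvRowSum r x1 - pvRowSum r x0
      = ((List.range' x0 (x1 - x0)).map (fun nx => pvInd (r.getD nx false))).sum := by
  obtain ⟨k, rfl⟩ : ∃ k, x1 = x0 + k := ⟨x1 - x0, by omega⟩
  simp only [Nat.add_sub_cancel_left]
  rw [pvRowSum, pvRowSum, List.take_add, List.map_append, List.sum_append,
      pvSliceSum r false pvInd x0 k (by omega)]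
  ring

lemma pvP_window (m : List (List Bool)) (y0 y1 j : Nat) (h0 : y0 ≤ y1) (h1 : y1 ≤ m.length) :
    pvP m y1 j - pvP m y0 j
      = ((List.range' y0 (y1 - y0)).map (fun ny => pvRowSum (m.getD ny []) j)).sum := by
  obtain ⟨k, rfl⟩ : ∃ k, y1 = y0 + k := ⟨y1 - y0, by omega⟩
  simp only [Nat.add_sub_cancel_left]
  rw [pvP, pvP, List.take_add, List.map_append, List.sum_append,
      pvSliceSum m [] (fun r => pvRowSum r j) y0 k (by omega)]
  ring

-- the per-cell identity: A's filtered 3x3 count = summed-area rectangle minus the center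
lemma pvCount_eq (m : List (List Bool)) (h w y x : Nat)
    (hlen : m.length = h) (hrow : ∀ r ∈ m, w ≤ r.length) (hy : y < h) (hx : x < w) :
    pvCountA m h w y x
      = pvP m (min h (y + 2)) (min w (x + 2)) - pvP m (y - 1) (min w (x + 2))
        - pvP m (min h (y + 2)) (x - 1) + pvP m (y - 1) (x - 1)
        - pvInd (pvCellGet m y x) := by
  have hx0 : x - 1 ≤ x := Nat.sub_le _ _
  have hx1 : x < min w (x+2) := by omega
  have hy1m : min h (y+2) ≤ m.length := by omega
  have hA : pvCountA m h w y x = ((List.range' (y-1) (min h (y+2) - (y-1))).map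
      (fun ny => (((List.range' (x-1) (min w (x+2) - (x-1))).countP
        (fun nx => decide ((ny, nx) ≠ (y, x) ∧ pvCellGet m ny nx = true)) : Nat) : Int))).sum := by
    unfold pvCountA
    rw [PySem.List.foldl_congr_mem (List.range' (y-1) (min h (y+2) - (y-1))) _
        (fun acc ny => acc + (((List.range' (x-1) (min w (x+2) - (x-1))).countP
          (fun nx => decide ((ny, nx) ≠ (y, x) ∧ pvCellGet m ny nx = true)) : Nat) : Int)) 0
        (fun acc ny _ => PySem.List.foldl_ite_add_one
          (fun nx => (ny, nx) ≠ (y, x) ∧ pvCellGet m ny nx = true)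
          (List.range' (x-1) (min w (x+2) - (x-1))) acc)]
    rw [PySem.List.foldl_add]
    simp
  rw [hA, List.map_congr_left (fun ny _ => pvInner m y x ny (x-1) (min w (x+2)) hx0 hx1), pvSumSub]
  rw [pvSingleSum (pvInd (pvCellGet m y x)) (y-1) (min h (y+2) - (y-1)) y (Nat.sub_le _ _) (by omega)]
  have hw1 := pvP_window m (y-1) (min h (y+2)) (min w (x+2)) (by omega) hy1m
  have hw0 := pvP_window m (y-1) (min h (y+2)) (x-1) (by omega) hy1m
  have hrowpt : ∀ ny ∈ List.range' (y-1) (min h (y+2) - (y-1)),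
      pvRowSum (m.getD ny []) (min w (x+2)) - pvRowSum (m.getD ny []) (x-1)
        = ((List.range' (x-1) (min w (x+2) - (x-1))).map (fun nx => pvInd (pvCellGet m ny nx))).sum := by
    intro ny hny
    have hnylt : ny < m.length := by
      have := (List.mem_range'_1.mp hny).2; omega
    have hmem : m.getD ny [] ∈ m := by
      rw [List.getD_eq_getElem m [] hnylt]; exact List.getElem_mem _
    exact pvRowSum_window (m.getD ny []) (x-1) (min w (x+2)) (by omega)
      (by have := hrow _ hmem; omega)
  have hRHS : pvP m (min h (y+2)) (min w (x+2)) - pvP m (y-1) (min w (x+2))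
      - pvP m (min h (y+2)) (x-1) + pvP m (y-1) (x-1)
      = ((List.range' (y-1) (min h (y+2) - (y-1))).map
          (fun ny => pvRowSum (m.getD ny []) (min w (x+2)) - pvRowSum (m.getD ny []) (x-1))).sum := by
    rw [pvSumSub, ← hw1, ← hw0]; ring
  rw [hRHS, List.map_congr_left hrowpt]

lemma pvStep_eq (h w : Nat) (m : List (List Bool))
    (hlen : m.length = h) (hrow : ∀ r ∈ m, w ≤ r.length) :
    pvStepA h w m = pvStepB h w m := by
  simp only [pvStepA, pvStepB]
  apply List.map_congr_left
  intro y hy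
  rw [List.mem_range] at hy
  apply List.map_congr_left
  intro x hx
  rw [List.mem_range] at hx
  simp only [pvSget w m hrow (min h (y+2)) (min w (x+2)) (by omega) (by omega),
      pvSget w m hrow (y-1) (min w (x+2)) (by omega) (by omega),
      pvSget w m hrow (min h (y+2)) (x-1) (by omega) (by omega),
      pvSget w m hrow (y-1) (x-1) (by omega) (by omega),
      pvCount_eq m h w y x hlen hrow hy hx]
  cases hc : pvCellGet m y x <;> simp [hc, pvInd, ge_iff_le]

lemma pvFold_eq (h w : Nat) : ∀ (l : List Nat) (m : List (List Bool)),
    m.length = h → (∀ r ∈ m, w ≤ r.length) →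
    l.foldl (fun m _ => pvStepA h w m) m = l.foldl (fun m _ => pvStepB h w m) m := by
  intro l
  induction l with
  | nil => intro m _ _; rfl
  | cons a l ih =>
    intro m hlen hrow
    simp only [List.foldl_cons]
    rw [← pvStep_eq h w m hlen hrow]
    apply ih
    · simp [pvStepA]
    · intro r hr
      simp only [pvStepA, List.mem_map] at hr
      obtain ⟨z, -, rfl⟩ := hr
      simp

-- ===== VERDICT (by name: the statement is the Claim_ definition above) =====
theorem apply_forest_cellular_automata_py_spec : Claim_equal_apply_forest_cellular_automata_py := by
  intro fm iters _ hpre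
  unfold Spec_apply_forest_cellular_automata_py
  unfold apply_forest_cellular_automata_py apply_forest_cellular_automata_py_alt
  rcases hpre with ⟨hne, hiter⟩
  rcases hiter with hle | hrows
  · have : iters.toNat = 0 := Int.toNat_of_nonpos hle
    simp [this]
  · exact pvFold_eq fm.length (fm.headD []).length (List.range iters.toNat) fm rfl hrows
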